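-- pv_equiv track=rewrite | github.com/iVan2734/makeup | app.py | replace_duplicate
-- ===== SOURCE A (Python) =====
-- def replace_duplicate(dataset, original_id, duplicate_id):
--     """Replace duplicate with original and remove duplicate"""
--     # Find indices
--     original_idx = None
--     duplicate_idx = None
--
--     for i, item in enumerate(dataset):
--         if item["id"] == original_id:
--             original_idx = i
--         if item["id"] == duplicate_id:
--             duplicate_idx = i
--
--     if original_idx is not None and duplicate_idx is not None:
--         # Remove duplicate
--         dataset.pop(duplicate_idx)
--         return True
--     return False
-- ===== SOURCE B (Python) =====
-- def replace_duplicate(dataset, original_id, duplicate_id):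
--     """Replace duplicate with original and remove duplicate"""
--     ids = [item["id"] for item in dataset]
--     if original_id not in ids or duplicate_id not in ids:
--         return False
--     last = len(ids) - 1 - ids[::-1].index(duplicate_id)
--     dataset.pop(last)
--     return True
-- ===== Notes on version B (the rewrite author's own statement) =====
-- stated objective: simpler
-- what changed: Staged decomposition instead of a single index-tracking loop: project the id column once, answer with plain membership tests, and locate the element to pop as the last occurrence via a reversed-list index search rather than carrying two optional indices through the scan.
import Mathlib
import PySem

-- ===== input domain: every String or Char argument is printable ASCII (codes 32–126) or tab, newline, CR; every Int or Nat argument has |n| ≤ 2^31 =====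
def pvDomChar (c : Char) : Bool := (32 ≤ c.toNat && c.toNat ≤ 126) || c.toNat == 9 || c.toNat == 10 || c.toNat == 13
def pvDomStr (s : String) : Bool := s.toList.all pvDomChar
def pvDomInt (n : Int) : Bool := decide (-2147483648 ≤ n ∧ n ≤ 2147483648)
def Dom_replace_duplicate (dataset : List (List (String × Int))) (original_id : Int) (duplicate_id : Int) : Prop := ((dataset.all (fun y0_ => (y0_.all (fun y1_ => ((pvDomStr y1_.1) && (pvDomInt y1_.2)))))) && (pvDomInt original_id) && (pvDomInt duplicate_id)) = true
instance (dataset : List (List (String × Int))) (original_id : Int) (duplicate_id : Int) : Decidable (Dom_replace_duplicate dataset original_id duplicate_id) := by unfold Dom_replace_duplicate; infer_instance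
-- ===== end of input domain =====

-- B replaces the single index-tracking loop by staged passes: project the id column, test
-- membership, pop the last occurrence found by a reversed-index search. NOTE: both Pythons pop
-- the same element of dataset in place when returning True; the theorems here are about the
-- RETURN value only (B performs the identical mutation).

-- ===== PORT A =====
-- item["id"] is (PySem.Dict.mk item).get? "id"; a missing key raises KeyError in Python and is
-- excluded by Pre_; the loop body (both ifs, in order) is the helper pvStepA.
def pvStepA (o d : Int) (acc : Option Int × Option Int) (p : Int × List (String × Int)) :
    Option Int × Option Int :=
  let acc1 := if (PySem.Dict.mk p.2).get? "id" == some o then (some p.1, acc.2) else acc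
  if (PySem.Dict.mk p.2).get? "id" == some d then (acc1.1, some p.1) else acc1

def replace_duplicate (dataset : List (List (String × Int))) (original_id : Int) (duplicate_id : Int) : Bool :=
  let r := (PySem.List.enumerate dataset).foldl (pvStepA original_id duplicate_id) (none, none)
  if r.1.isSome && r.2.isSome then true else false

-- ===== PORT B =====
-- the list comprehension [item["id"] for item in dataset]; get? returns Option, so ids is a
-- List (Option Int) and membership is tested against `some id` (a missing "id" key, KeyError in
-- Python, is excluded by Pre_). The reversed-index search and pop of Source B only mutate the list
-- and do not touch the return value, so they are not modelled here (return-value port).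
def replace_duplicate_alt (dataset : List (List (String × Int))) (original_id : Int) (duplicate_id : Int) : Bool :=
  let ids : List (Option Int) := dataset.map (fun item => (PySem.Dict.mk item).get? "id")
  if !(ids.contains (some original_id)) || !(ids.contains (some duplicate_id)) then false
  else true

-- ===== PRECONDITION & SPEC =====
-- Pre_ excludes datasets containing an item without an "id" key, on which Python A raises KeyError.
def Pre_replace_duplicate (dataset : List (List (String × Int))) (original_id : Int) (duplicate_id : Int) : Prop :=
  dataset.all (fun item => ((PySem.Dict.mk item).get? "id").isSome) = true
instance (dataset : List (List (String × Int))) (original_id : Int) (duplicate_id : Int) : Decidable (Pre_replace_duplicate dataset original_id duplicate_id) := by unfold Pre_replace_duplicate; infer_instance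
def pvWitness_replace_duplicate : (List (List (String × Int))) × Int × Int :=
  ([[("id", 1), ("shade", 3)], [("id", 2)]], 1, 2)
def Spec_replace_duplicate (dataset : List (List (String × Int))) (original_id : Int) (duplicate_id : Int) (out : Bool) : Prop := out = replace_duplicate_alt dataset original_id duplicate_id
instance (dataset : List (List (String × Int))) (original_id : Int) (duplicate_id : Int) (out : Bool) : Decidable (Spec_replace_duplicate dataset original_id duplicate_id out) := by unfold Spec_replace_duplicate; infer_instance

-- ===== CLAIM (what is proved, stated in full; the proofs are below) =====
def Claim_equal_replace_duplicate : Prop := ∀ (dataset : List (List (String × Int))) (original_id : Int) (duplicate_id : Int), Dom_replace_duplicate dataset original_id duplicate_id → Pre_replace_duplicate dataset original_id duplicate_id → Spec_replace_duplicate dataset original_id duplicate_id (replace_duplicate dataset original_id duplicate_id)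

-- ===== LEMMAS AND PROOFS =====

-- one step of A: each component becomes some p.1 on a match, else is kept
theorem pvStepA_eq (o d : Int) (acc : Option Int × Option Int) (p : Int × List (String × Int)) :
    pvStepA o d acc p =
      (if (PySem.Dict.mk p.2).get? "id" == some o then some p.1 else acc.1,
       if (PySem.Dict.mk p.2).get? "id" == some d then some p.1 else acc.2) := by
  unfold pvStepA
  by_cases ho : (PySem.Dict.mk p.2).get? "id" == some o <;>
    by_cases hd : (PySem.Dict.mk p.2).get? "id" == some d <;> simp [ho, hd]

-- A's loop: a component is Some iff it started Some or some item's id matches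
theorem pvA_fst (o d : Int) (ps : List (Int × List (String × Int))) (a b : Option Int) :
    (ps.foldl (pvStepA o d) (a, b)).1.isSome
    = (a.isSome || ps.any (fun p => (PySem.Dict.mk p.2).get? "id" == some o)) := by
  induction ps generalizing a b with
  | nil => simp
  | cons p ps ih =>
    rw [List.foldl_cons, pvStepA_eq, ih]
    by_cases ho : (PySem.Dict.mk p.2).get? "id" == some o <;> simp [ho]

theorem pvA_snd (o d : Int) (ps : List (Int × List (String × Int))) (a b : Option Int) :
    (ps.foldl (pvStepA o d) (a, b)).2.isSome
    = (b.isSome || ps.any (fun p => (PySem.Dict.mk p.2).get? "id" == some d)) := by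
  induction ps generalizing a b with
  | nil => simp
  | cons p ps ih =>
    rw [List.foldl_cons, pvStepA_eq, ih]
    by_cases hd : (PySem.Dict.mk p.2).get? "id" == some d <;> simp [hd]

-- any over the enumerated list, looking only at the item, is any over the list itself
theorem pv_any_enumerate (g : List (String × Int) → Bool)
    (xs : List (List (String × Int))) (s : Int) :
    (PySem.List.enumerate xs s).any (fun p => g p.2) = xs.any g := by
  induction xs generalizing s with
  | nil => simp [PySem.List.enumerate_nil]
  | cons x xs ih => simp [PySem.List.enumerate_cons, ih]

-- membership in the projected id column is an existence test over the items
theorem pv_contains_map (k : Int) (xs : List (List (String × Int))) :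
    (xs.map (fun item => (PySem.Dict.mk item).get? "id")).contains (some k)
    = xs.any (fun item => (PySem.Dict.mk item).get? "id" == some k) := by
  induction xs with
  | nil => simp
  | cons x xs ih =>
    simp only [List.map_cons, List.contains_cons, List.any_cons, ih]
    by_cases h : (PySem.Dict.mk x).get? "id" = some k
    · simp [h]
    · have h1 : (some k == (PySem.Dict.mk x).get? "id") = false := by
        simp [Ne.symm h]
      have h2 : ((PySem.Dict.mk x).get? "id" == some k) = false := by simp [h]
      simp [h1, h2]

-- ===== VERDICT (by name: the statement is the Claim_ definition above) =====
theorem replace_duplicate_spec : Claim_equal_replace_duplicate := by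
  intro dataset o d _ _
  unfold Spec_replace_duplicate replace_duplicate replace_duplicate_alt
  simp only [pvA_fst, pvA_snd, pv_contains_map, Option.isSome_none, Bool.false_or]
  rw [pv_any_enumerate (fun item => (PySem.Dict.mk item).get? "id" == some o) dataset 0,
    pv_any_enumerate (fun item => (PySem.Dict.mk item).get? "id" == some d) dataset 0]
  cases dataset.any (fun item => (PySem.Dict.mk item).get? "id" == some o) <;>
    cases dataset.any (fun item => (PySem.Dict.mk item).get? "id" == some d) <;> simp
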